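-- pv_equiv track=rewrite | github.com/serdeliverance/mendozaaa | find_longest_sub_array_by_sum/find_longest_sub_array_by_sum.py | find_sub_array_starting_from
-- ===== SOURCE A (Python) =====
-- def find_sub_array_starting_from(index, arr, target):
--     sub_arr = []
--     sum = 0
--
--     for index in range(index, len(arr)):
--         if sum + arr[index] > target:
--             break
--
--         sum += arr[index]
--         sub_arr.append(arr[index])
--
--     return sub_arr if sum == target else []
-- ===== SOURCE B (Python) =====
-- def find_sub_array_starting_from(index, arr, target):
--     # pass 1: materialize the candidate elements (same indices as A's loop,
--     # including Python's negative-index wraparound)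
--     elems = [arr[i] for i in range(index, len(arr))]
--     # pass 2: prefix-sum table
--     cum = []
--     t = 0
--     for x in elems:
--         t += x
--         cum.append(t)
--     # pass 3: length of the prefix whose running sums stay within target
--     k = 0
--     while k < len(cum) and cum[k] <= target:
--         k += 1
--     s = cum[k - 1] if k else 0
--     return elems[:k] if s == target else []
-- ===== Notes on version B (the rewrite author's own statement) =====
-- stated objective: alternative
-- what changed: Replaced the single break-on-overflow accumulate loop with three separate passes: materialize the candidate elements, build a prefix-sum table, then scan for the longest prefix of running sums within target.
import Mathlib
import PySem

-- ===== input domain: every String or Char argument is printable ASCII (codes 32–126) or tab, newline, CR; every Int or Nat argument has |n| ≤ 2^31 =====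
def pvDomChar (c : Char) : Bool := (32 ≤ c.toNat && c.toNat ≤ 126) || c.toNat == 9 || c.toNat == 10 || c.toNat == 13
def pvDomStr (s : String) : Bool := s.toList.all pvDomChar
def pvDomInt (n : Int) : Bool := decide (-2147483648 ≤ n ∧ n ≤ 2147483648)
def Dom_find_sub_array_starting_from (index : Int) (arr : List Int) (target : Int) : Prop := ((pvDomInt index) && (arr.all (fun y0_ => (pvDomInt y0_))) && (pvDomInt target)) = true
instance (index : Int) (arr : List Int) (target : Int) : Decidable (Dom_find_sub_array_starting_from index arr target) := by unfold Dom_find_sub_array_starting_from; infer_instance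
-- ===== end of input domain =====

-- B replaces A's single break-on-overflow accumulating loop by three passes
-- (materialize elements, prefix-sum table, scan for the within-target prefix);
-- same return value on every admitted input (objective: alternative).

-- ===== PORT A =====
-- A's for-loop with break, iterating over range(index, len(arr)) and reading
-- arr[index] each step (negative-index wraparound via pyGet?; Pre_ excludes the
-- IndexError case, so getD 0 is never taken).
def findA_loop (arr : List Int) (target : Int) : List Int → List Int → Int → (List Int × Int)
  | [], sub, sum => (sub, sum)
  | i :: rest, sub, sum =>
    let x := (PySem.List.pyGet? arr i).getD 0
    if sum + x > target then (sub, sum)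
    else findA_loop arr target rest (sub ++ [x]) (sum + x)

def find_sub_array_starting_from (index : Int) (arr : List Int) (target : Int) : List Int :=
  let r := findA_loop arr target (PySem.List.pyRange index (arr.length : Int) 1) [] 0
  if r.2 = target then r.1 else []

-- ===== PORT B =====
-- cum-building loop of Source B (prefix sums threading t)
def cumB : List Int → Int → List Int
  | [], _ => []
  | x :: rest, t => (t + x) :: cumB rest (t + x)

-- the while loop counting how many leading sums are ≤ target
def kB (target : Int) : List Int → Nat
  | [] => 0
  | c :: rest => if c ≤ target then kB target rest + 1 else 0

def find_sub_array_starting_from_alt (index : Int) (arr : List Int) (target : Int) : List Int :=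
  let elems := (PySem.List.pyRange index (arr.length : Int) 1).map
                 (fun i => (PySem.List.pyGet? arr i).getD 0)
  let cum := cumB elems 0
  let k := kB target cum
  let s := if k = 0 then 0 else cum.getD (k - 1) 0
  if s = target then elems.take k else []

-- ===== PRECONDITION & SPEC =====
-- Pre_ excludes exactly the inputs where A raises IndexError: index < -len(arr)
-- makes the first arr[index] access go out of range.
def Pre_find_sub_array_starting_from (index : Int) (arr : List Int) (target : Int) : Prop :=
  -(arr.length : Int) ≤ index
instance (index : Int) (arr : List Int) (target : Int) : Decidable (Pre_find_sub_array_starting_from index arr target) := by unfold Pre_find_sub_array_starting_from; infer_instance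

def pvWitness_find_sub_array_starting_from : Int × List Int × Int := (1, [3, 1, 2, 5], 3)

def Spec_find_sub_array_starting_from (index : Int) (arr : List Int) (target : Int) (out : List Int) : Prop := out = find_sub_array_starting_from_alt index arr target
instance (index : Int) (arr : List Int) (target : Int) (out : List Int) : Decidable (Spec_find_sub_array_starting_from index arr target out) := by unfold Spec_find_sub_array_starting_from; infer_instance

-- ===== CLAIM (what is proved, stated in full; the proofs are below) =====
def Claim_equal_find_sub_array_starting_from : Prop := ∀ (index : Int) (arr : List Int) (target : Int), Dom_find_sub_array_starting_from index arr target → Pre_find_sub_array_starting_from index arr target → Spec_find_sub_array_starting_from index arr target (find_sub_array_starting_from index arr target)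

-- ===== LEMMAS AND PROOFS =====

-- A's loop over indices equals the same loop over the pre-fetched elements list.
def goA (target : Int) : List Int → List Int → Int → (List Int × Int)
  | [], sub, sum => (sub, sum)
  | x :: rest, sub, sum =>
    if sum + x > target then (sub, sum)
    else goA target rest (sub ++ [x]) (sum + x)

theorem findA_loop_eq_goA (arr : List Int) (target : Int) (idxs : List Int)
    (sub : List Int) (sum : Int) :
    findA_loop arr target idxs sub sum
      = goA target (idxs.map (fun i => (PySem.List.pyGet? arr i).getD 0)) sub sum := by
  induction idxs generalizing sub sum with
  | nil => rfl
  | cons i rest ih =>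
    simp only [findA_loop, goA, List.map]
    split
    · rfl
    · exact ih _ _

-- goA's result in terms of B's prefix-sum table and counter.
theorem goA_eq (target : Int) (elems : List Int) (sub : List Int) (sum : Int) :
    goA target elems sub sum
      = (sub ++ elems.take (kB target (cumB elems sum)),
         if kB target (cumB elems sum) = 0 then sum
         else (cumB elems sum).getD (kB target (cumB elems sum) - 1) 0) := by
  induction elems generalizing sub sum with
  | nil => simp [goA, cumB, kB]
  | cons x rest ih =>
    simp only [goA, cumB, kB]
    by_cases h : sum + x > target
    · have h' : ¬ sum + x ≤ target := by omega
      simp [h, h']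
    · have h' : sum + x ≤ target := by omega
      rw [if_neg h, ih]
      simp only [if_pos h', Prod.mk.injEq]
      refine ⟨?_, ?_⟩
      · simp [List.take_succ_cons]
      · rcases Nat.eq_zero_or_pos (kB target (cumB rest (sum + x))) with hk | hk
        · simp [hk]
        · have hk0 : kB target (cumB rest (sum + x)) + 1 ≠ 0 := by omega
          have hk1 : ¬ kB target (cumB rest (sum + x)) = 0 := by omega
          simp only [if_neg hk0, if_neg hk1, Nat.add_sub_cancel]
          rcases Nat.exists_eq_succ_of_ne_zero hk1 with ⟨m, hm⟩
          simp [hm]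

-- ===== VERDICT (by name: the statement is the Claim_ definition above) =====
theorem find_sub_array_starting_from_spec : Claim_equal_find_sub_array_starting_from := by
  intro index arr target _ _
  unfold Spec_find_sub_array_starting_from
  unfold find_sub_array_starting_from find_sub_array_starting_from_alt
  rw [findA_loop_eq_goA, goA_eq]
  rfl
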